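-- pv_equiv track=rewrite | github.com/ddalko/CP_Training | AdcKi/Week#1/UVA11581.py | f
-- ===== SOURCE A (Python) =====
-- def f(g):
--   sizeIterable = range(3)
--   temp = [[0] * 3 for i in sizeIterable]
--
--   temp[0][0] = (g[0][1] + g[1][0]) % 2
--   temp[0][1] = (g[0][0] + g[1][1] + g[0][2]) % 2
--   temp[0][2] = (g[0][1] + g[1][2]) % 2
--
--   temp[1][0] = (g[0][0] + g[1][1] + g[2][0]) % 2
--   temp[1][1] = (g[0][1] + g[1][0] + g[1][2] + g[2][1]) % 2
--   temp[1][2] = (g[0][2] + g[1][1] + g[2][2]) % 2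
--
--   temp[2][0] = (g[1][0] + g[2][1]) % 2
--   temp[2][1] = (g[2][0] + g[1][1] + g[2][2]) % 2
--   temp[2][2] = (g[2][1] + g[1][2]) % 2
--   return temp
-- ===== SOURCE B (Python) =====
-- def f(g):
--     temp = [[0] * 3 for _ in range(3)]
--     for i in range(3):
--         for j in range(3):
--             s = 0
--             for di, dj in ((-1, 0), (1, 0), (0, -1), (0, 1)):
--                 ni, nj = i + di, j + dj
--                 if 0 <= ni < 3 and 0 <= nj < 3:
--                     s += g[ni][nj]
--             temp[i][j] = s % 2
--     return temp
-- ===== Notes on version B (the rewrite author's own statement) =====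
-- stated objective: idiomatic
-- what changed: Replaces A's nine hardcoded parity expressions with a double loop over cells accumulating in-bounds orthogonal neighbors via an offset list.
import Mathlib
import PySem

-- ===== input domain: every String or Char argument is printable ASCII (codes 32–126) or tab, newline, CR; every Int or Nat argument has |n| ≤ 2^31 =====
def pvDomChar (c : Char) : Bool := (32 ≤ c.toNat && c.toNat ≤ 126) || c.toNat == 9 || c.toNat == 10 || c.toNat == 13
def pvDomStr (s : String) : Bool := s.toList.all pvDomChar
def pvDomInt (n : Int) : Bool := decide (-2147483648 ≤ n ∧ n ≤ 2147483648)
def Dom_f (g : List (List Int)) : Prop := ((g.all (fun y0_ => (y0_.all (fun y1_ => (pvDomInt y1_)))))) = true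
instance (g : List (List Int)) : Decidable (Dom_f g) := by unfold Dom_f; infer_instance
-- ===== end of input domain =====

-- B replaces A's nine hardcoded parity expressions with a neighbor-offset double loop (idiomatic; same cost).


-- ===== PORT A =====
-- g[i][j] (total form, exact under Pre_f which guarantees the index is in range)
def cellA (g : List (List Int)) (i j : Int) : Int :=
  PySem.List.pyGetD (PySem.List.pyGetD g i []) j 0

-- temp[i][j] = v (total form, exact under Pre_f)
def setCell (t : List (List Int)) (i j : Int) (v : Int) : List (List Int) :=
  PySem.List.pySetD t i (PySem.List.pySetD (PySem.List.pyGetD t i []) j v)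

def f (g : List (List Int)) : List (List Int) :=
  let temp := (PySem.List.pyRange 0 3 1).map (fun _ => List.replicate 3 (0 : Int))
  let temp := setCell temp 0 0 (PySem.Int.mod (cellA g 0 1 + cellA g 1 0) 2)
  let temp := setCell temp 0 1 (PySem.Int.mod (cellA g 0 0 + cellA g 1 1 + cellA g 0 2) 2)
  let temp := setCell temp 0 2 (PySem.Int.mod (cellA g 0 1 + cellA g 1 2) 2)
  let temp := setCell temp 1 0 (PySem.Int.mod (cellA g 0 0 + cellA g 1 1 + cellA g 2 0) 2)
  let temp := setCell temp 1 1 (PySem.Int.mod (cellA g 0 1 + cellA g 1 0 + cellA g 1 2 + cellA g 2 1) 2)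
  let temp := setCell temp 1 2 (PySem.Int.mod (cellA g 0 2 + cellA g 1 1 + cellA g 2 2) 2)
  let temp := setCell temp 2 0 (PySem.Int.mod (cellA g 1 0 + cellA g 2 1) 2)
  let temp := setCell temp 2 1 (PySem.Int.mod (cellA g 2 0 + cellA g 1 1 + cellA g 2 2) 2)
  let temp := setCell temp 2 2 (PySem.Int.mod (cellA g 2 1 + cellA g 1 2) 2)
  temp

-- ===== PORT B =====
def f_alt (g : List (List Int)) : List (List Int) :=
  let temp := (PySem.List.pyRange 0 3 1).map (fun _ => List.replicate 3 (0 : Int))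
  (PySem.List.pyRange 0 3 1).foldl (fun temp i =>
    (PySem.List.pyRange 0 3 1).foldl (fun temp j =>
      let s := ([(-1, 0), (1, 0), (0, -1), (0, 1)] : List (Int × Int)).foldl (fun s dd =>
        let ni := i + dd.1
        let nj := j + dd.2
        if 0 ≤ ni ∧ ni < 3 ∧ 0 ≤ nj ∧ nj < 3 then
          s + PySem.List.pyGetD (PySem.List.pyGetD g ni []) nj 0
        else s) 0
      PySem.List.pySetD temp i
        (PySem.List.pySetD (PySem.List.pyGetD temp i []) j (PySem.Int.mod s 2))) temp) temp

-- ===== PRECONDITION & SPEC =====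
-- Pre_f: A raises IndexError unless the grid has at least 3 rows whose first three rows each have at least 3 entries.
def Pre_f (g : List (List Int)) : Prop :=
  3 ≤ g.length ∧ ∀ r ∈ g.take 3, 3 ≤ r.length
instance (g : List (List Int)) : Decidable (Pre_f g) := by unfold Pre_f; infer_instance

def pvWitness_f : List (List Int) := [[1, 0, 1], [0, 1, 0], [1, 1, 0]]

def Spec_f (g : List (List Int)) (out : List (List Int)) : Prop := out = f_alt g
instance (g : List (List Int)) (out : List (List Int)) : Decidable (Spec_f g out) := by unfold Spec_f; infer_instance

-- ===== CLAIM (what is proved, stated in full; the proofs are below) =====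
def Claim_equal_f : Prop := ∀ (g : List (List Int)), Dom_f g → Pre_f g → Spec_f g (f g)

-- ===== LEMMAS AND PROOFS =====

-- ===== VERDICT (by name: the statement is the Claim_ definition above) =====
theorem f_spec : Claim_equal_f := by
  intro g _ hpre
  obtain ⟨hlen, hrows⟩ := hpre
  obtain ⟨r0, r1, r2, t, rfl⟩ :
      ∃ r0 r1 r2 t, g = r0 :: r1 :: r2 :: t := by
    match g, hlen with
    | a :: b :: c :: t, _ => exact ⟨a, b, c, t, rfl⟩
  have h0 : 3 ≤ r0.length := hrows r0 (by simp)
  have h1 : 3 ≤ r1.length := hrows r1 (by simp)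
  have h2 : 3 ≤ r2.length := hrows r2 (by simp)
  obtain ⟨a0, a1, a2, _, rfl⟩ : ∃ x y z t, r0 = x :: y :: z :: t := by
    match r0, h0 with | x :: y :: z :: t, _ => exact ⟨x, y, z, t, rfl⟩
  obtain ⟨b0, b1, b2, _, rfl⟩ : ∃ x y z t, r1 = x :: y :: z :: t := by
    match r1, h1 with | x :: y :: z :: t, _ => exact ⟨x, y, z, t, rfl⟩
  obtain ⟨c0, c1, c2, _, rfl⟩ : ∃ x y z t, r2 = x :: y :: z :: t := by
    match r2, h2 with | x :: y :: z :: t, _ => exact ⟨x, y, z, t, rfl⟩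
  show f _ = f_alt _
  have hr : PySem.List.pyRange 0 3 1 = [0, 1, 2] := by decide
  simp [f, f_alt, hr, cellA, setCell, PySem.List.pyGetD_ofNat',
        PySem.List.pySetD_of_nonneg, PySem.Int.mod]
  and_intros <;> (congr 1; ring)
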